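-- pv_equiv track=rewrite | github.com/PhPeKe/OB1_SAM | Testing/testing_bigrams.py | factor_range
-- ===== SOURCE A (Python) =====
-- def factor_range(wordlength,bigram_range):
--     totalbigrams=0
--     for i in range(wordlength,0,-1):
--         if i - (bigram_range) > 0:
--             totalbigrams+= bigram_range
--         else:
--             totalbigrams+=(i-1)
--     return totalbigrams
-- ===== SOURCE B (Python) =====
-- def factor_range(wordlength, bigram_range):
--     # closed form: each i in 1..wordlength contributes bigram_range if i > bigram_range, else i-1
--     n = max(wordlength, 0)
--     m = min(max(bigram_range, 0), n)
--     return bigram_range * (n - m) + m * (m - 1) // 2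
-- ===== Notes on version B (the rewrite author's own statement) =====
-- stated objective: faster
-- what changed: replaces the per-index loop with closed-form arithmetic: a clamped count times bigram_range plus a triangular-number sum
import Mathlib
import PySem

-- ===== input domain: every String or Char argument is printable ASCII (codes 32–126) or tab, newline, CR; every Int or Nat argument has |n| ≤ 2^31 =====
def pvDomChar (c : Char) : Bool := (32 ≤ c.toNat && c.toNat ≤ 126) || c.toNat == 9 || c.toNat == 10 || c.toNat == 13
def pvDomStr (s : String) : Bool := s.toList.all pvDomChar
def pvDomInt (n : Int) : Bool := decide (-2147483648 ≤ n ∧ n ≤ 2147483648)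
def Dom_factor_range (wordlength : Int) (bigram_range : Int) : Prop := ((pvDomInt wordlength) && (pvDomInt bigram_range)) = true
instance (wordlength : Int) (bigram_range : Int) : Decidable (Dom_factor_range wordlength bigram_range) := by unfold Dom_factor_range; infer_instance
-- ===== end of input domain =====

-- B replaces A's O(wordlength) countdown loop by O(1) closed-form arithmetic (objective: faster).

-- ===== PORT A =====
def factor_range (wordlength : Int) (bigram_range : Int) : Int :=
  (PySem.List.pyRange wordlength 0 (-1)).foldl
    (fun totalbigrams i =>
      if i - bigram_range > 0 then totalbigrams + bigram_range
      else totalbigrams + (i - 1)) 0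

-- ===== PORT B =====
def factor_range_alt (wordlength : Int) (bigram_range : Int) : Int :=
  let n := max wordlength 0
  let m := min (max bigram_range 0) n
  bigram_range * (n - m) + PySem.Int.floordiv (m * (m - 1)) 2

-- ===== PRECONDITION & SPEC =====
def Spec_factor_range (wordlength : Int) (bigram_range : Int) (out : Int) : Prop := out = factor_range_alt wordlength bigram_range
instance (wordlength : Int) (bigram_range : Int) (out : Int) : Decidable (Spec_factor_range wordlength bigram_range out) := by unfold Spec_factor_range; infer_instance

-- ===== CLAIM (what is proved, stated in full; the proofs are below) =====
def Claim_equal_factor_range : Prop := ∀ (wordlength : Int) (bigram_range : Int), Dom_factor_range wordlength bigram_range → Spec_factor_range wordlength bigram_range (factor_range wordlength bigram_range)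

-- ===== LEMMAS AND PROOFS =====

-- closed form for the loop, with a general accumulator, by induction on the Nat length of the range
theorem factor_range_loop_closed (r : Int) (k : Nat) : ∀ init : Int,
    (PySem.List.pyRange (k : Int) 0 (-1)).foldl
      (fun totalbigrams i =>
        if i - r > 0 then totalbigrams + r
        else totalbigrams + (i - 1)) init
    = init + r * ((k : Int) - min (max r 0) (k : Int))
        + PySem.Int.floordiv (min (max r 0) (k : Int) * (min (max r 0) (k : Int) - 1)) 2 := by
  induction k with
  | zero =>
      intro init
      rw [PySem.List.pyRange_neg_one_eq_nil (by norm_num)]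
      simp [PySem.Int.floordiv]
  | succ k ih =>
      intro init
      rw [PySem.List.pyRange_neg_one_cons (by exact_mod_cast Nat.succ_pos k)]
      simp only [List.foldl_cons]
      have hcast : ((k + 1 : Nat) : Int) - 1 = (k : Int) := by push_cast; ring
      rw [hcast, ih]
      rw [PySem.Int.floordiv_eq_ediv_of_pos (by norm_num),
          PySem.Int.floordiv_eq_ediv_of_pos (by norm_num)]
      push_cast
      split_ifs with h
      · -- (k+1) - r > 0, i.e. r ≤ k : the min clamps at r on both sides (or both at the bound)
        have hr : r ≤ (k : Int) := by omega
        rcases le_or_gt r 0 with hr0 | hr0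
        · rw [max_eq_right hr0]
          have h1 : min (0:Int) (k:Int) = 0 := by omega
          have h2 : min (0:Int) ((k:Int)+1) = 0 := by omega
          rw [h1, h2]; ring_nf
        · have h1 : min (max r 0) (k:Int) = r := by omega
          have h2 : min (max r 0) ((k:Int)+1) = r := by omega
          rw [h1, h2]; ring
      · -- (k+1) ≤ r : everything clamps at the range end
        have hr : (k : Int) + 1 ≤ r := by omega
        have h1 : min (max r 0) (k:Int) = (k:Int) := by omega
        have h2 : min (max r 0) ((k:Int)+1) = (k:Int)+1 := by omega
        rw [h1, h2]
        have hk : ((k:Int)+1) * ((k:Int)+1-1) = (k:Int) * ((k:Int)-1) + 2 * (k:Int) := by ring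
        rw [hk]
        have : ((k:Int) * ((k:Int)-1) + 2 * (k:Int)) / 2 = (k:Int) * ((k:Int)-1) / 2 + (k:Int) := by
          omega
        rw [this]; ring

-- ===== VERDICT (by name: the statement is the Claim_ definition above) =====
theorem factor_range_spec : Claim_equal_factor_range := by
  intro wordlength bigram_range _
  unfold Spec_factor_range factor_range factor_range_alt
  rcases le_or_gt wordlength 0 with h | h
  · rw [PySem.List.pyRange_neg_one_eq_nil h]
    have hn : max wordlength 0 = 0 := by omega
    simp [hn, PySem.Int.floordiv]
  · have hk : wordlength = ((wordlength.toNat : Int)) := by omega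
    rw [hk, factor_range_loop_closed, ← hk]
    have hm : max wordlength 0 = wordlength := by omega
    show 0 + bigram_range * (wordlength - min (max bigram_range 0) wordlength) +
        PySem.Int.floordiv (min (max bigram_range 0) wordlength * (min (max bigram_range 0) wordlength - 1)) 2 =
      bigram_range * (max wordlength 0 - min (max bigram_range 0) (max wordlength 0)) +
        PySem.Int.floordiv (min (max bigram_range 0) (max wordlength 0) * (min (max bigram_range 0) (max wordlength 0) - 1)) 2
    rw [hm]; ring
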